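-- pv_equiv track=rewrite | github.com/HoYoung1/backjoon-Level | backjoon_level_python/2805.py | solve
-- ===== SOURCE A (Python) =====
-- def solve(N, M, tree_heights):
--     start = 0
--     end = max(tree_heights)
--
--     answer = 0
--     while start <= end:
--         mid = (start + end) // 2
--         cutting_sum = sum([height-mid if height-mid > 0 else 0 for height in tree_heights])
--         if cutting_sum >= M:
--             answer = mid
--             start = mid + 1
--         else:
--             end = mid - 1
--     return answer
-- ===== SOURCE B (Python) =====
-- def _bisect_right(s, x):
--     # hand-rolled bisect_right (A imports no modules, so none allowed here)
--     lo, hi = 0, len(s)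
--     while lo < hi:
--         m = (lo + hi) // 2
--         if s[m] <= x:
--             lo = m + 1
--         else:
--             hi = m
--     return lo
--
--
-- def solve(N, M, tree_heights):
--     s = sorted(tree_heights)
--     n = len(s)
--     # suffix[i] = total height of the trees s[i:]
--     suffix = [0] * (n + 1)
--     for i in range(n - 1, -1, -1):
--         suffix[i] = suffix[i + 1] + s[i]
--     start = 0
--     end = s[-1]
--     answer = 0
--     while start <= end:
--         mid = (start + end) // 2
--         idx = _bisect_right(s, mid)
--         # wood collected at cut height mid: trees strictly above mid
--         if suffix[idx] - mid * (n - idx) >= M: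
--             answer = mid
--             start = mid + 1
--         else:
--             end = mid - 1
--     return answer
-- ===== Notes on version B (the rewrite author's own statement) =====
-- stated objective: faster
-- what changed: Sorts the trees once and precomputes suffix sums, so each binary-search probe is answered by a bisect lookup on the sorted array (suffix[idx] - mid*(n-idx)) instead of rescanning all trees.
import Mathlib
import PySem

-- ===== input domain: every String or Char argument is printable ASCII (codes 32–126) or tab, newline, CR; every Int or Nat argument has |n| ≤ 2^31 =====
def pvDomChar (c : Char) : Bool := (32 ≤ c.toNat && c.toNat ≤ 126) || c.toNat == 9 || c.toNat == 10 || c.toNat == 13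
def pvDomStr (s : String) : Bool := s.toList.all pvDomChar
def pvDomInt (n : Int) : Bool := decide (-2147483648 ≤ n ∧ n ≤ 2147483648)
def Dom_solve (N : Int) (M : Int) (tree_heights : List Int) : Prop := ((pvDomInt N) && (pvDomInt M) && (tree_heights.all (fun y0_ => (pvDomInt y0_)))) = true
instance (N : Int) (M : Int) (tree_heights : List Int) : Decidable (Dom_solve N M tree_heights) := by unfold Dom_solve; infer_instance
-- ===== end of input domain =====

-- B replaces A's per-probe rescan of all trees with a sorted array + suffix sums, answering each
-- binary-search probe by a bisect lookup (objective: faster).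

-- ===== PORT A =====
-- sum([height-mid if height-mid > 0 else 0 for height in tree_heights])
def cutSumA (mid : Int) (tree_heights : List Int) : Int :=
  (tree_heights.map (fun height => if height - mid > 0 then height - mid else 0)).sum

-- A's 'while start <= end' binary search; fuel = (end - start + 1).toNat bounds the
-- iteration count (the range shrinks every pass), it only makes the recursion structural
def loopA (M : Int) (tree_heights : List Int) : Nat → Int → Int → Int → Int
  | 0, _, _, answer => answer
  | fuel + 1, start, end_, answer =>
    if start ≤ end_ then
      let mid := PySem.Int.floordiv (start + end_) 2
      if cutSumA mid tree_heights ≥ M then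
        loopA M tree_heights fuel (mid + 1) end_ mid
      else
        loopA M tree_heights fuel start (mid - 1) answer
    else answer

def solve (N : Int) (M : Int) (tree_heights : List Int) : Int :=
  match PySem.List.max? tree_heights (fun x => x) with
  | none => 0          -- max([]) raises ValueError; excluded by Pre_solve
  | some e => loopA M tree_heights (e - 0 + 1).toNat 0 e 0

-- ===== PORT B =====
-- the backward loop filling suffix[i] = suffix[i+1] + s[i], with suffix[n] = 0
def suffixSums : List Int → List Int
  | [] => [0]
  | h :: t => ((suffixSums t).headD 0 + h) :: suffixSums t

-- B's binary search; each probe reads the precomputed table via _bisect_right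
def loopB (M : Int) (s suffix : List Int) (n : Int) : Nat → Int → Int → Int → Int
  | 0, _, _, answer => answer
  | fuel + 1, start, end_, answer =>
    if start ≤ end_ then
      let mid := PySem.Int.floordiv (start + end_) 2
      let idx : Int := (PySem.List.bisectRight s mid : Nat)
      if PySem.List.pyGetD suffix idx 0 - mid * (n - idx) ≥ M then
        loopB M s suffix n fuel (mid + 1) end_ mid
      else
        loopB M s suffix n fuel start (mid - 1) answer
    else answer

def solve_alt (N : Int) (M : Int) (tree_heights : List Int) : Int :=
  let s := PySem.List.sorted tree_heights (fun x => x) false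
  match PySem.List.pyGet? s (-1) with
  | none => 0          -- s[-1] on the empty list raises IndexError; excluded by Pre_solve
  | some e => loopB M s (suffixSums s) (s.length : Int) (e - 0 + 1).toNat 0 e 0

-- ===== PRECONDITION & SPEC =====
-- Pre_ excludes only the empty list, on which both A (max([])) and B (s[-1]) raise.
def Pre_solve (N : Int) (M : Int) (tree_heights : List Int) : Prop := tree_heights ≠ []
instance (N : Int) (M : Int) (tree_heights : List Int) : Decidable (Pre_solve N M tree_heights) := by unfold Pre_solve; infer_instance
def pvWitness_solve : Int × Int × List Int := (4, 7, ([20, 15, 10, 17] : List Int))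

def Spec_solve (N : Int) (M : Int) (tree_heights : List Int) (out : Int) : Prop := out = solve_alt N M tree_heights
instance (N : Int) (M : Int) (tree_heights : List Int) (out : Int) : Decidable (Spec_solve N M tree_heights out) := by unfold Spec_solve; infer_instance

-- ===== CLAIM (what is proved, stated in full; the proofs are below) =====
def Claim_equal_solve : Prop := ∀ (N : Int) (M : Int) (tree_heights : List Int), Dom_solve N M tree_heights → Pre_solve N M tree_heights → Spec_solve N M tree_heights (solve N M tree_heights)

-- ===== LEMMAS AND PROOFS =====

-- suffixSums has length n+1 and entry i = sum of s.drop i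
theorem length_suffixSums (s : List Int) : (suffixSums s).length = s.length + 1 := by
  induction s with
  | nil => rfl
  | cons h t ih => simp [suffixSums, ih]

theorem headD_suffixSums (s : List Int) : (suffixSums s).headD 0 = s.sum := by
  induction s with
  | nil => rfl
  | cons h t ih =>
    simp only [suffixSums, List.headD_cons, List.sum_cons, ih]; ring

theorem getElem_suffixSums (s : List Int) (i : Nat) (hi : i < (suffixSums s).length) :
    (suffixSums s)[i] = (s.drop i).sum := by
  induction s generalizing i with
  | nil =>
    simp [suffixSums] at hi
    subst hi; rfl
  | cons h t ih =>
    cases i with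
    | zero =>
      simp only [suffixSums, List.getElem_cons_zero, List.drop_zero, List.sum_cons]
      rw [headD_suffixSums]; ring
    | succ j =>
      have hj : j < (suffixSums t).length := by
        simpa [suffixSums] using hi
      simpa [suffixSums] using ih j hj

-- a list whose elements are all ≤ mid contributes 0 to A's comprehension sum
theorem cutSumA_of_le (mid : Int) (l : List Int) (hl : ∀ h ∈ l, h ≤ mid) :
    cutSumA mid l = 0 := by
  induction l with
  | nil => rfl
  | cons h t ih =>
    have h1 : h ≤ mid := hl h (by simp)
    have h2 := ih (fun x hx => hl x (by simp [hx]))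
    simp [cutSumA] at h2 ⊢
    rw [if_neg (by omega)]
    omega

-- a list whose elements are all > mid contributes its sum minus mid per element
theorem cutSumA_of_gt (mid : Int) (l : List Int) (hl : ∀ h ∈ l, mid < h) :
    cutSumA mid l = l.sum - mid * (l.length : Int) := by
  induction l with
  | nil => simp [cutSumA]
  | cons h t ih =>
    have h1 : mid < h := hl h (by simp)
    have h2 := ih (fun x hx => hl x (by simp [hx]))
    simp [cutSumA] at h2 ⊢
    rw [if_pos (by omega)]
    rw [h2]; ring

-- the comprehension sum is invariant under permutation
theorem cutSumA_perm (mid : Int) {l₁ l₂ : List Int} (hp : l₁.Perm l₂) :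
    cutSumA mid l₁ = cutSumA mid l₂ := by
  unfold cutSumA
  exact List.Perm.sum_eq (hp.map _)

-- B's table lookup at the bisect index equals A's rescan, for every probe mid
theorem query_eq (tree_heights : List Int) (mid : Int) :
    (let s := PySem.List.sorted tree_heights (fun x => x) false
     PySem.List.pyGetD (suffixSums s) ((PySem.List.bisectRight s mid : Nat) : Int) 0
       - mid * ((s.length : Int) - ((PySem.List.bisectRight s mid : Nat) : Int)))
    = cutSumA mid tree_heights := by
  set s := PySem.List.sorted tree_heights (fun x => x) false with hs
  have hsorted : List.Pairwise (· ≤ ·) s := by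
    simpa using PySem.List.sorted_pairwise (xs := tree_heights) (key := fun x => x)
  obtain ⟨hk_le, hk_lt, hk_gt⟩ := PySem.List.bisectRight_spec s mid hsorted
  set k := PySem.List.bisectRight s mid with hk
  -- the lookup is the suffix sum
  have hlook : PySem.List.pyGetD (suffixSums s) ((k : Nat) : Int) 0 = (s.drop k).sum := by
    rw [PySem.List.pyGetD_natCast]
    have hkl : k < (suffixSums s).length := by rw [length_suffixSums]; omega
    rw [List.getD_eq_getElem _ _ hkl]
    exact getElem_suffixSums s k hkl
  -- A's sum over the sorted list splits at k
  have hsplit : cutSumA mid s = (s.drop k).sum - mid * ((s.length : Int) - (k : Int)) := by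
    have htake : cutSumA mid (s.take k) = 0 := by
      apply cutSumA_of_le
      intro h hh
      obtain ⟨i, hi, hget⟩ := List.getElem_of_mem hh
      have hik : i < k := by
        have := hi; simp [List.length_take] at this; omega
      have hil : i < s.length := by omega
      have : (s.take k)[i] = s[i] := List.getElem_take
      rw [this] at hget
      rw [← hget]
      exact hk_lt i hil hik
    have hdrop : cutSumA mid (s.drop k) =
        (s.drop k).sum - mid * ((s.drop k).length : Int) := by
      apply cutSumA_of_gt
      intro h hh
      obtain ⟨i, hi, hget⟩ := List.getElem_of_mem hh
      have hil : k + i < s.length := by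
        have := hi; simp [List.length_drop] at this; omega
      have : (s.drop k)[i] = s[k + i] := List.getElem_drop ..
      rw [this] at hget
      rw [← hget]
      exact hk_gt (k + i) hil (by omega)
    have hlen : (((s.drop k).length) : Int) = (s.length : Int) - (k : Int) := by
      simp [List.length_drop]; omega
    calc cutSumA mid s = cutSumA mid (s.take k ++ s.drop k) := by rw [List.take_append_drop]
      _ = cutSumA mid (s.take k) + cutSumA mid (s.drop k) := by
            simp [cutSumA]
      _ = (s.drop k).sum - mid * ((s.length : Int) - (k : Int)) := by
            rw [htake, hdrop, hlen]; ring
  have hperm : cutSumA mid s = cutSumA mid tree_heights :=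
    cutSumA_perm mid (PySem.List.sorted_perm tree_heights (fun x => x) false)
  simp only []
  rw [hlook, ← hperm, hsplit]

-- with equal probe answers the two binary searches run in lockstep
theorem loop_eq (M : Int) (tree_heights : List Int) :
    ∀ (fuel : Nat) (start end_ answer : Int),
    loopB M (PySem.List.sorted tree_heights (fun x => x) false)
          (suffixSums (PySem.List.sorted tree_heights (fun x => x) false))
          (((PySem.List.sorted tree_heights (fun x => x) false).length : Int)) fuel start end_ answer
      = loopA M tree_heights fuel start end_ answer := by
  intro fuel
  induction fuel with
  | zero => intro start end_ answer; rfl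
  | succ n ih =>
    intro start end_ answer
    show loopB _ _ _ _ (n + 1) _ _ _ = loopA _ _ (n + 1) _ _ _
    rw [loopB, loopA]
    by_cases h : start ≤ end_
    · rw [if_pos h, if_pos h]
      set mid := PySem.Int.floordiv (start + end_) 2 with hm
      have hq := query_eq tree_heights mid
      simp only [] at hq
      simp only [hq]
      by_cases hc : cutSumA mid tree_heights ≥ M
      · rw [if_pos hc, if_pos hc]
        exact ih (mid + 1) end_ mid
      · rw [if_neg hc, if_neg hc]
        exact ih start (mid - 1) answer
    · rw [if_neg h, if_neg h]

-- on a nonempty list, B's s[-1] (last of the sorted list) is exactly A's max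
theorem last_sorted_eq_max (tree_heights : List Int) (hne : tree_heights ≠ []) (m : Int)
    (hm : PySem.List.max? tree_heights (fun x => x) = some m) :
    PySem.List.pyGet? (PySem.List.sorted tree_heights (fun x => x) false) (-1) = some m := by
  set s := PySem.List.sorted tree_heights (fun x => x) false with hs
  have hperm : s.Perm tree_heights := PySem.List.sorted_perm tree_heights (fun x => x) false
  have hsne : s ≠ [] := by
    intro h
    exact hne ((PySem.List.sorted_eq_nil_iff tree_heights (fun x => x) false).mp (hs ▸ h))
  rw [PySem.List.pyGet?_neg_one]
  rw [List.getLast?_eq_some_getLast hsne]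
  congr 1
  set l := s.getLast hsne with hl
  have hlmem : l ∈ tree_heights := hperm.mem_iff.mp (List.getLast_mem hsne)
  have hle : l ≤ m := PySem.List.max?_isMax hm l hlmem
  have hmmem : m ∈ s := hperm.mem_iff.mpr (PySem.List.max?_mem hm)
  -- every element of the ≤-sorted s is ≤ its last element
  have hsorted : List.Pairwise (· ≤ ·) s := by
    simpa using PySem.List.sorted_pairwise (xs := tree_heights) (key := fun x => x)
  have hge : m ≤ l := by
    obtain ⟨i, hi, hget⟩ := List.getElem_of_mem hmmem
    have hlast : s.getLast hsne = s[s.length - 1] := List.getLast_eq_getElem hsne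
    rcases Nat.lt_or_ge i (s.length - 1) with hlt | hgei
    · have := List.pairwise_iff_getElem.mp hsorted i (s.length - 1) (by omega) (by omega) (by omega)
      rw [hget] at this
      rw [hl, hlast]; exact this
    · have hieq : i = s.length - 1 := by omega
      subst hieq
      rw [hl, hlast]
      exact le_of_eq hget.symm
  omega

-- ===== VERDICT (by name: the statement is the Claim_ definition above) =====
theorem solve_spec : Claim_equal_solve := by
  intro N M tree_heights _hdom hne
  unfold Spec_solve solve solve_alt
  cases hm : PySem.List.max? tree_heights (fun x => x) with
  | none =>
    exact absurd ((PySem.List.max?_eq_none_iff tree_heights (fun x => x)).mp hm) hne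
  | some e =>
    simp only []
    rw [last_sorted_eq_max tree_heights hne e hm]
    exact (loop_eq M tree_heights ((e - 0 + 1).toNat) 0 e 0).symm
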